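-- pv_equiv track=rewrite | github.com/dkirsh/Tagging_Contractor | tools/generate_scope_expansion_batch.py | append_until
-- ===== SOURCE A (Python) =====
-- from typing import Any, Dict, List, Tuple
--
-- def append_until(existing: List[str], candidates: List[str], target: int) -> List[str]:
--     out = list(existing)
--     existing_lower = {s.strip().lower() for s in out}
--     for item in candidates:
--         if len(out) >= target:
--             break
--         s = item.strip()
--         if not s:
--             continue
--         if s.lower() in existing_lower:
--             continue
--         out.append(s)
--         existing_lower.add(s.lower())
--     return out
-- ===== SOURCE B (Python) =====
-- def append_until(existing, candidates, target):
--     taken = {s.strip().lower() for s in existing}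
--     stripped = [c.strip() for c in candidates]
--     # first-occurrence index of each lowercased candidate, built once
--     first = {}
--     for i, s in enumerate(stripped):
--         first.setdefault(s.lower(), i)
--     fresh = [s for i, s in enumerate(stripped)
--              if s and s.lower() not in taken and first[s.lower()] == i]
--     need = target - len(existing)
--     return existing + fresh[:need if need > 0 else 0]
-- ===== Notes on version B (the rewrite author's own statement) =====
-- stated objective: alternative
-- what changed: Replaces A's fused decide-and-break loop with a mutating seen-set by a staged pipeline: a precomputed first-occurrence index dict over the lowercased stripped candidates, a pure (mutation-free) comprehension that filters by 'not in existing and first occurrence here', and a clamped slice appended to existing.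
import Mathlib
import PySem

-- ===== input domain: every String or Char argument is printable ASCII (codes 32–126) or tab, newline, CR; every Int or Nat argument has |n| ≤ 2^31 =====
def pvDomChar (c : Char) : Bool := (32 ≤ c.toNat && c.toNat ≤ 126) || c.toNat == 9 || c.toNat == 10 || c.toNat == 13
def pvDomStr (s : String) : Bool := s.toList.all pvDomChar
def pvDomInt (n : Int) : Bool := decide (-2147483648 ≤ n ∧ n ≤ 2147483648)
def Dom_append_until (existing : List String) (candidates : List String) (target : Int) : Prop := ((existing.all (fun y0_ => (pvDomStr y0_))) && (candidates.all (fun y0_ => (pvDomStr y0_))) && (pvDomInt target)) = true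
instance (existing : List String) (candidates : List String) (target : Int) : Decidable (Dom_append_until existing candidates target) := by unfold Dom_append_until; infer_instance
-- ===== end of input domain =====

-- B replaces A's fused decide-and-break loop (running seen-set, len check each step) by a staged
-- pipeline: a first-occurrence index dict built once over the lowercased stripped candidates,
-- a pure filter by that dict, and a clamped slice appended to existing; objective: alternative.

-- ===== PORT A =====
-- A's for-loop: state = (out, existing_lower); break when len(out) >= target
def appendUntilLoopA (out : List String) (seen : PySem.Set String) (cs : List String) (target : Int) : List String :=
  match cs with
  | [] => out
  | c :: rest =>
    if (out.length : Int) ≥ target then out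
    else
      let s := PySem.Str.strip c
      if s = "" then appendUntilLoopA out seen rest target
      else if PySem.Set.contains seen (PySem.Str.lower s) then appendUntilLoopA out seen rest target
      else appendUntilLoopA (out ++ [s]) (PySem.Set.add seen (PySem.Str.lower s)) rest target

def append_until (existing : List String) (candidates : List String) (target : Int) : List String :=
  let out := existing
  let existingLower : PySem.Set String :=
    PySem.Set.ofList (out.map (fun s => PySem.Str.lower (PySem.Str.strip s)))
  appendUntilLoopA out existingLower candidates target

-- ===== PORT B =====
def append_until_alt (existing : List String) (candidates : List String) (target : Int) : List String :=
  let taken : PySem.Set String :=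
    PySem.Set.ofList (existing.map (fun s => PySem.Str.lower (PySem.Str.strip s)))
  let stripped := candidates.map PySem.Str.strip
  -- first.setdefault(s.lower(), i) over enumerate(stripped)
  let first : PySem.Dict String Int :=
    (PySem.List.enumerate stripped 0).foldl
      (fun d p => d.setdefault (PySem.Str.lower p.2) p.1) PySem.Dict.empty
  let fresh := (PySem.List.enumerate stripped 0).filterMap
    (fun p => if p.2 ≠ "" ∧ PySem.Set.contains taken (PySem.Str.lower p.2) = false ∧
                 first.get? (PySem.Str.lower p.2) = some p.1
              then some p.2 else none)
  let need := target - (existing.length : Int)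
  existing ++ fresh.take (if need > 0 then need else 0).toNat

-- ===== PRECONDITION & SPEC =====
def Spec_append_until (existing : List String) (candidates : List String) (target : Int) (out : List String) : Prop := out = append_until_alt existing candidates target
instance (existing : List String) (candidates : List String) (target : Int) (out : List String) : Decidable (Spec_append_until existing candidates target out) := by unfold Spec_append_until; infer_instance

-- ===== CLAIM (what is proved, stated in full; the proofs are below) =====
def Claim_equal_append_until : Prop := ∀ (existing : List String) (candidates : List String) (target : Int), Dom_append_until existing candidates target → Spec_append_until existing candidates target (append_until existing candidates target)

-- ===== LEMMAS AND PROOFS =====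

-- proof-side reference list: the acceptable fresh candidates, dedup via the set of ALL prior keys
def freshAll (E : PySem.Set String) (seenAll : PySem.Set String) (ss : List String) : List String :=
  match ss with
  | [] => []
  | s :: rest =>
    let k := PySem.Str.lower s
    if s ≠ "" ∧ PySem.Set.contains E k = false ∧ PySem.Set.contains seenAll k = false then
      s :: freshAll E (PySem.Set.add seenAll k) rest
    else freshAll E (PySem.Set.add seenAll k) rest

theorem contains_add_eq (s : PySem.Set String) (x y : String) :
    PySem.Set.contains (PySem.Set.add s x) y = (PySem.Set.contains s y || y == x) := by
  rw [Bool.eq_iff_iff]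
  simp [PySem.Set.mem_add]

theorem lower_empty_iff (s : String) : PySem.Str.lower s = "" ↔ s = "" := by
  constructor
  · intro h
    have h2 := congrArg String.toList h
    simp [pysem] at h2
    have h3 : s.toList.length = 0 := by
      have := congrArg List.length h2
      simpa [PySem.Chars.lower] using this
    have h4 : s.toList = [] := List.eq_nil_of_length_eq_zero h3
    exact String.ext (by simp [h4])
  · intro h; subst h; rfl

-- the setdefault fold computes the first-occurrence index
theorem first_fold_get? (ss : List String) : ∀ (i : Int) (d : PySem.Dict String Int) (k : String),
    ((PySem.List.enumerate ss i).foldl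
      (fun d p => d.setdefault (PySem.Str.lower p.2) p.1) d).get? k
    = ((d.get? k).or ((ss.findIdx? (fun s => PySem.Str.lower s == k)).map (fun j => i + j))) := by
  induction ss with
  | nil => intro i d k; simp [PySem.List.enumerate]
  | cons s rest ih =>
    intro i d k
    rw [PySem.List.enumerate_cons, List.foldl_cons, List.findIdx?_cons, ih]
    by_cases hk : PySem.Str.lower s = k
    · subst hk
      simp only [beq_self_eq_true, if_pos]
      rw [PySem.Dict.get?_setdefault_self]
      cases hd : d.get? (PySem.Str.lower s) <;> simp
    · rw [PySem.Dict.get?_setdefault_of_ne _ _ (fun h => hk h.symm)]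
      rw [if_neg (by simp [hk])]
      congr 1
      cases List.findIdx? (fun s => PySem.Str.lower s == k) rest <;> simp
      ring

-- B's filterMap over the full-list first-occurrence dict equals the running reference recursion
theorem filter_eq_freshAll (ss : List String) : ∀ (i : Int) (E seenAll : PySem.Set String)
    (d : PySem.Dict String Int),
    (∀ k, PySem.Set.contains seenAll k = true → ∃ v : Int, d.get? k = some v ∧ v < i) →
    (∀ k, PySem.Set.contains seenAll k = false →
      d.get? k = (ss.findIdx? (fun s => PySem.Str.lower s == k)).map (fun j => i + j)) →
    (PySem.List.enumerate ss i).filterMap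
      (fun p => if p.2 ≠ "" ∧ PySem.Set.contains E (PySem.Str.lower p.2) = false ∧
                   d.get? (PySem.Str.lower p.2) = some p.1
                then some p.2 else none)
    = freshAll E seenAll ss := by
  induction ss with
  | nil => intro i E seenAll d h1 h2; simp [PySem.List.enumerate, freshAll]
  | cons s rest ih =>
    intro i E seenAll d h1 h2
    rw [PySem.List.enumerate_cons, List.filterMap_cons]
    have htail : ∀ k', PySem.Set.contains (PySem.Set.add seenAll (PySem.Str.lower s)) k' = false →
        d.get? k' = (rest.findIdx? (fun t => PySem.Str.lower t == k')).map (fun j => (i + 1) + j) := by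
      intro k' hk'
      rw [contains_add_eq] at hk'
      simp only [Bool.or_eq_false_iff, beq_eq_false_iff_ne] at hk'
      obtain ⟨hns, hne⟩ := hk'
      have := h2 k' hns
      rw [List.findIdx?_cons, if_neg (by simp [Ne.symm hne])] at this
      rw [this]
      cases List.findIdx? (fun t => PySem.Str.lower t == k') rest <;> simp
      ring
    have hhead : ∀ (w : Int), d.get? (PySem.Str.lower s) = some w → w < i + 1 →
        (∀ k', PySem.Set.contains (PySem.Set.add seenAll (PySem.Str.lower s)) k' = true →
          ∃ v : Int, d.get? k' = some v ∧ v < i + 1) := by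
      intro w hw hwi k' hk'
      rw [contains_add_eq] at hk'
      simp only [Bool.or_eq_true, beq_iff_eq] at hk'
      by_cases hs : PySem.Set.contains seenAll k' = true
      · obtain ⟨v, hv, hvi⟩ := h1 k' hs; exact ⟨v, hv, by omega⟩
      · have : k' = PySem.Str.lower s := by
          rcases hk' with h | h
          · exact absurd h hs
          · exact h
        subst this; exact ⟨w, hw, hwi⟩
    by_cases hA : PySem.Set.contains seenAll (PySem.Str.lower s) = true
    · obtain ⟨v, hv, hvi⟩ := h1 _ hA
      have hcond : ¬(s ≠ "" ∧ PySem.Set.contains E (PySem.Str.lower s) = false ∧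
          d.get? (PySem.Str.lower s) = some i) := by
        rintro ⟨-, -, hd⟩
        rw [hv] at hd; injection hd with h; omega
      rw [if_neg hcond]
      have hfr : freshAll E seenAll (s :: rest)
          = freshAll E (PySem.Set.add seenAll (PySem.Str.lower s)) rest := by
        rw [freshAll]; rw [if_neg (by rintro ⟨-, -, h⟩; rw [hA] at h; cases h)]
      rw [hfr]
      exact ih (i+1) E _ d (hhead v hv (by omega)) htail
    · have hA' : PySem.Set.contains seenAll (PySem.Str.lower s) = false :=
        Bool.not_eq_true _ ▸ (Bool.eq_false_iff.mpr hA)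
      have hd : d.get? (PySem.Str.lower s) = some i := by
        have := h2 _ hA'
        rw [List.findIdx?_cons, if_pos (by simp)] at this
        simpa using this
      have hih := ih (i+1) E (PySem.Set.add seenAll (PySem.Str.lower s)) d
        (hhead i hd (by omega)) htail
      by_cases hc : s ≠ "" ∧ PySem.Set.contains E (PySem.Str.lower s) = false
      · rw [if_pos ⟨hc.1, hc.2, hd⟩]
        rw [freshAll, if_pos ⟨hc.1, hc.2, hA'⟩, hih]
      · rw [if_neg (by rintro ⟨ha, hb, -⟩; exact hc ⟨ha, hb⟩)]
        rw [freshAll, if_neg (by rintro ⟨ha, hb, -⟩; exact hc ⟨ha, hb⟩)]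
        exact hih

-- A's fused loop = out ++ clamped prefix of the reference list
theorem loopA_eq_take (cs : List String) : ∀ (out : List String)
    (seen E seenAll : PySem.Set String) (target : Int),
    (∀ k, PySem.Set.contains seen k =
      (PySem.Set.contains E k || (PySem.Set.contains seenAll k && !PySem.Set.contains E k && !(k == "")))) →
    appendUntilLoopA out seen cs target
      = out ++ (freshAll E seenAll (cs.map PySem.Str.strip)).take
          (if target - (out.length : Int) > 0 then target - (out.length : Int) else 0).toNat := by
  induction cs with
  | nil => intro out seen E seenAll target hseen; simp [appendUntilLoopA, freshAll]
  | cons c rest ih =>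
    intro out seen E seenAll target hseen
    rw [List.map_cons]
    rw [appendUntilLoopA]
    by_cases hbreak : (out.length : Int) ≥ target
    · rw [if_pos hbreak]
      have h0 : (if target - (out.length : Int) > 0 then target - (out.length : Int) else 0).toNat = 0 := by
        split_ifs <;> omega
      rw [h0]; simp
    · rw [if_neg hbreak]
      by_cases he : PySem.Str.strip c = ""
      · rw [if_pos he]
        have hfr : freshAll E seenAll (PySem.Str.strip c :: List.map PySem.Str.strip rest)
            = freshAll E (PySem.Set.add seenAll "") (List.map PySem.Str.strip rest) := by
          have hl : PySem.Str.lower "" = "" := by decide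
          rw [he]; simp [freshAll, hl]
        rw [hfr]
        apply ih
        intro k'
        rw [contains_add_eq, hseen k']
        by_cases hk : k' = ""
        · subst hk; simp
        · have hbe : (k' == "") = false := by simp [hk]
          rw [hbe]; simp
      · rw [if_neg he]
        have hkne : PySem.Str.lower (PySem.Str.strip c) ≠ "" := by
          intro h; exact he ((lower_empty_iff _).mp h)
        by_cases hm : PySem.Set.contains seen (PySem.Str.lower (PySem.Str.strip c)) = true
        · rw [if_pos hm]
          have hor : (PySem.Set.contains E (PySem.Str.lower (PySem.Str.strip c))
              || (PySem.Set.contains seenAll (PySem.Str.lower (PySem.Str.strip c))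
                  && !PySem.Set.contains E (PySem.Str.lower (PySem.Str.strip c))
                  && !((PySem.Str.lower (PySem.Str.strip c)) == ""))) = true := by
            rw [← hseen]; exact hm
          have hfr : freshAll E seenAll (PySem.Str.strip c :: List.map PySem.Str.strip rest)
              = freshAll E (PySem.Set.add seenAll (PySem.Str.lower (PySem.Str.strip c)))
                  (List.map PySem.Str.strip rest) := by
            rw [freshAll]
            rw [if_neg (by
              rintro ⟨-, hE, hS⟩
              rw [hE, hS] at hor
              simp at hor)]
          rw [hfr]
          apply ih
          intro k'
          rw [contains_add_eq, hseen k']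
          by_cases hk : k' = PySem.Str.lower (PySem.Str.strip c)
          · rw [hk]
            cases hE : PySem.Set.contains E (PySem.Str.lower (PySem.Str.strip c)) <;>
              cases hS : PySem.Set.contains seenAll (PySem.Str.lower (PySem.Str.strip c)) <;>
                rw [hE, hS] at hor <;> simp_all [beq_eq_false_iff_ne]
          · have hbe : (k' == PySem.Str.lower (PySem.Str.strip c)) = false := by simp [hk]
            rw [hbe]; simp
        · rw [if_neg hm]
          have hm' : PySem.Set.contains seen (PySem.Str.lower (PySem.Str.strip c)) = false :=
            Bool.eq_false_iff.mpr hm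
          rw [hseen] at hm'
          have hE : PySem.Set.contains E (PySem.Str.lower (PySem.Str.strip c)) = false := by
            cases h : PySem.Set.contains E (PySem.Str.lower (PySem.Str.strip c))
            · rfl
            · rw [h] at hm'; simp at hm'
          have hS : PySem.Set.contains seenAll (PySem.Str.lower (PySem.Str.strip c)) = false := by
            cases h : PySem.Set.contains seenAll (PySem.Str.lower (PySem.Str.strip c))
            · rfl
            · rw [h, hE] at hm'
              simp [hkne] at hm'
          have hfr : freshAll E seenAll (PySem.Str.strip c :: List.map PySem.Str.strip rest)
              = PySem.Str.strip c :: freshAll E (PySem.Set.add seenAll (PySem.Str.lower (PySem.Str.strip c)))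
                  (List.map PySem.Str.strip rest) := by
            rw [freshAll, if_pos ⟨he, hE, hS⟩]
          rw [hfr]
          rw [ih (out ++ [PySem.Str.strip c]) _ E (PySem.Set.add seenAll (PySem.Str.lower (PySem.Str.strip c))) target ?hinv]
          case hinv =>
            intro k'
            rw [contains_add_eq, contains_add_eq, hseen k']
            by_cases hk : k' = PySem.Str.lower (PySem.Str.strip c)
            · rw [hk]
              simp [beq_eq_false_iff_ne, hkne]
              exact em _
            · have hbe : (k' == PySem.Str.lower (PySem.Str.strip c)) = false := by simp [hk]
              rw [hbe]; simp
          have hlen : ((out ++ [PySem.Str.strip c]).length : Int) = (out.length : Int) + 1 := by simp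
          rw [hlen]
          have hn : (if target - (out.length : Int) > 0 then target - (out.length : Int) else 0).toNat
              = (if target - ((out.length : Int) + 1) > 0 then target - ((out.length : Int) + 1) else 0).toNat + 1 := by
            split_ifs <;> omega
          rw [hn, List.take_succ_cons, List.append_assoc]
          rfl

-- ===== VERDICT (by name: the statement is the Claim_ definition above) =====
theorem append_until_spec : Claim_equal_append_until := by
  intro ex cs t _
  unfold Spec_append_until append_until append_until_alt
  rw [loopA_eq_take cs ex _ (PySem.Set.ofList (ex.map fun s => PySem.Str.lower (PySem.Str.strip s)))
        PySem.Set.empty t (by intro k; simp [PySem.Set.empty])]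
  congr 1
  rw [filter_eq_freshAll (cs.map PySem.Str.strip) 0
        (PySem.Set.ofList (ex.map fun s => PySem.Str.lower (PySem.Str.strip s))) PySem.Set.empty _
        (by intro k hk; simp [PySem.Set.empty] at hk)
        (by intro k _
            rw [first_fold_get?]
            simp [PySem.Dict.get?_empty])]
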